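-- pv_equiv track=rewrite | github.com/schimmmi/n8n-workflow-builder | src/n8n_workflow_builder/templates/intent_extractor.py | _extract_purpose
-- ===== SOURCE A (Python) =====
-- from typing import Dict, List, Optional
--
-- def _extract_purpose(name: str, description: str, nodes: List[Dict]) -> str:
--     """Extract the primary intent/purpose"""
--     # Start with description if available
--     if description:
--         return description.split(".")[0]  # First sentence
--
--     # Fall back to name
--     if name:
--         return f"Workflow: {name}"
--
--     # Analyze nodes to infer intent
--     node_types = [node.get("type", "") for node in nodes]
--
--     if any("database" in nt.lower() for nt in node_types):
--         return "Database operations workflow"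
--     elif any("http" in nt.lower() for nt in node_types):
--         return "API integration workflow"
--     elif any("slack" in nt.lower() or "email" in nt.lower() for nt in node_types):
--         return "Notification workflow"
--     else:
--         return "Data processing workflow"
-- ===== SOURCE B (Python) =====
-- _RESULTS = [
--     "Database operations workflow",
--     "API integration workflow",
--     "Notification workflow",
--     "Data processing workflow",
-- ]
--
-- def _rank(nt):
--     """Numeric category rank of a (lowercased) node type; smaller = higher priority."""
--     if "database" in nt:
--         return 0
--     if "http" in nt:
--         return 1
--     if "slack" in nt or "email" in nt:
--         return 2
--     return 3
--
-- def _extract_purpose(name, description, nodes):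
--     """Extract the primary intent/purpose"""
--     if description:
--         return description.split(".")[0]
--     if name:
--         return f"Workflow: {name}"
--     # Minimum-rank search with early exit, then table lookup -- no per-category scans.
--     best = 3
--     for node in nodes:
--         best = min(best, _rank(node.get("type", "").lower()))
--         if best == 0:
--             break
--     return _RESULTS[best]
-- ===== Notes on version B (the rewrite author's own statement) =====
-- stated objective: alternative
-- what changed: Replaces the node_types list and the three per-category any(...) scans by a numeric ranking: each node type is lowercased once and mapped to a priority rank, a single early-exiting loop keeps the minimum rank, and the answer is looked up in a result table indexed by that rank.
import Mathlib
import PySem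

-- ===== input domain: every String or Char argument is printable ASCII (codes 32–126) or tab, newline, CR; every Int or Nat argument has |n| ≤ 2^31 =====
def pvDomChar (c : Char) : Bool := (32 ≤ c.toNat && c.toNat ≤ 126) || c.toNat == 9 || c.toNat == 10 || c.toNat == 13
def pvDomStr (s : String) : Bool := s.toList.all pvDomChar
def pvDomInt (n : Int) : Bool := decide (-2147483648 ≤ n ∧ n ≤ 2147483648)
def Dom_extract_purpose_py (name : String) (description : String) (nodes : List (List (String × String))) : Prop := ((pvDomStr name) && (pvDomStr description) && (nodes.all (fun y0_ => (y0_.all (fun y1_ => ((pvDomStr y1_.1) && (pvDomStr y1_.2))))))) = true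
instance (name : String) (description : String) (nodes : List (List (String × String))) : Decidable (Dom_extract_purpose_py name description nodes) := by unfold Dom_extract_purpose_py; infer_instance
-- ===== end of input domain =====

-- B replaces A's node_types list and three per-category any(...) scans by a numeric
-- priority rank per node, a single early-exiting minimum-rank loop, and a result-table
-- lookup; alternative decomposition, same asymptotic cost.

-- ===== PORT A =====
def extract_purpose_py (name : String) (description : String) (nodes : List (List (String × String))) : String :=
  if description ≠ "" then
    -- description.split(".")[0]; split? with sep "." is always some nonempty list
    ((PySem.Str.split? description ".").getD []).headD ""
  else if name ≠ "" then
    "Workflow: " ++ name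
  else
    let node_types := nodes.map (fun node => (PySem.Dict.mk node).getD "type" "")
    if node_types.any (fun nt => PySem.Str.isIn "database" (PySem.Str.lower nt)) then
      "Database operations workflow"
    else if node_types.any (fun nt => PySem.Str.isIn "http" (PySem.Str.lower nt)) then
      "API integration workflow"
    else if node_types.any (fun nt => PySem.Str.isIn "slack" (PySem.Str.lower nt) || PySem.Str.isIn "email" (PySem.Str.lower nt)) then
      "Notification workflow"
    else
      "Data processing workflow"

-- ===== PORT B =====
-- the _RESULTS table
def pvResults : List String :=
  ["Database operations workflow", "API integration workflow",
   "Notification workflow", "Data processing workflow"]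

-- _rank: numeric category rank of a lowercased node type
def pvRank (nt : String) : Nat :=
  if PySem.Str.isIn "database" nt then 0
  else if PySem.Str.isIn "http" nt then 1
  else if PySem.Str.isIn "slack" nt || PySem.Str.isIn "email" nt then 2
  else 3

-- the early-exiting minimum-rank loop over nodes (break when best = 0)
def pvMinRank : List (List (String × String)) → Nat → Nat
  | [], best => best
  | node :: rest, best =>
    let best' := min best (pvRank (PySem.Str.lower ((PySem.Dict.mk node).getD "type" "")))
    if best' = 0 then best' else pvMinRank rest best'

def extract_purpose_py_alt (name : String) (description : String) (nodes : List (List (String × String))) : String :=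
  if description ≠ "" then
    ((PySem.Str.split? description ".").getD []).headD ""
  else if name ≠ "" then
    "Workflow: " ++ name
  else
    -- _RESULTS[best]; best is always < 4 so the Python index never raises
    pvResults.getD (pvMinRank nodes 3) ""

-- ===== PRECONDITION & SPEC =====
def Spec_extract_purpose_py (name : String) (description : String) (nodes : List (List (String × String))) (out : String) : Prop := out = extract_purpose_py_alt name description nodes
instance (name : String) (description : String) (nodes : List (List (String × String))) (out : String) : Decidable (Spec_extract_purpose_py name description nodes out) := by unfold Spec_extract_purpose_py; infer_instance

-- ===== CLAIM (what is proved, stated in full; the proofs are below) =====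
def Claim_equal_extract_purpose_py : Prop := ∀ (name : String) (description : String) (nodes : List (List (String × String))), Dom_extract_purpose_py name description nodes → Spec_extract_purpose_py name description nodes (extract_purpose_py name description nodes)

-- ===== LEMMAS AND PROOFS =====

def pvType (node : List (String × String)) : String :=
  PySem.Str.lower ((PySem.Dict.mk node).getD "type" "")

theorem pvRank_le (nt : String) : pvRank nt ≤ 3 := by
  unfold pvRank; split_ifs <;> omega

theorem pvFoldr_le (l : List (List (String × String))) :
    l.foldr (fun n r => min (pvRank (pvType n)) r) 3 ≤ 3 := by
  induction l with
  | nil => simp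
  | cons y ys ihy => simp only [List.foldr_cons]; omega

-- the early exit is sound: the loop computes the plain minimum
theorem pvMinRank_eq_min (l : List (List (String × String))) :
    ∀ best, best ≤ 3 → pvMinRank l best = min best (l.foldr (fun n r => min (pvRank (pvType n)) r) 3) := by
  induction l with
  | nil => intro best h; simp only [pvMinRank, List.foldr_nil]; omega
  | cons x xs ih =>
    intro best h
    simp only [pvMinRank, pvType, List.foldr_cons]
    have hr := pvRank_le (pvType x)
    have hf := pvFoldr_le xs
    split_ifs with h0
    · omega
    · rw [ih _ (by simp only [pvType] at *; omega)]
      simp only [pvType]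
      omega

-- the plain minimum is characterised by the three per-category scans
theorem pvFoldr_char (nodes : List (List (String × String))) :
    nodes.foldr (fun n r => min (pvRank (pvType n)) r) 3 =
      if nodes.any (fun n => PySem.Str.isIn "database" (pvType n)) then 0
      else if nodes.any (fun n => PySem.Str.isIn "http" (pvType n)) then 1
      else if nodes.any (fun n => PySem.Str.isIn "slack" (pvType n) || PySem.Str.isIn "email" (pvType n)) then 2
      else 3 := by
  induction nodes with
  | nil => simp
  | cons x xs ih =>
    simp only [List.foldr_cons, List.any_cons, ih]
    unfold pvRank
    rcases Bool.eq_false_or_eq_true (PySem.Str.isIn "database" (pvType x)) with h0 | h0 <;>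
      rcases Bool.eq_false_or_eq_true (PySem.Str.isIn "http" (pvType x)) with h1 | h1 <;>
        rcases Bool.eq_false_or_eq_true (PySem.Str.isIn "slack" (pvType x)) with h2 | h2 <;>
          rcases Bool.eq_false_or_eq_true (PySem.Str.isIn "email" (pvType x)) with h3 | h3 <;>
            rcases Bool.eq_false_or_eq_true (xs.any (fun n => PySem.Str.isIn "database" (pvType n))) with a0 | a0 <;>
              rcases Bool.eq_false_or_eq_true (xs.any (fun n => PySem.Str.isIn "http" (pvType n))) with a1 | a1 <;>
                rcases Bool.eq_false_or_eq_true (xs.any (fun n => PySem.Str.isIn "slack" (pvType n) || PySem.Str.isIn "email" (pvType n))) with a2 | a2 <;>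
                  simp only [h0, h1, h2, h3, a0, a1, a2, Bool.or_true,
                    Bool.or_false, Bool.false_eq_true, reduceIte] <;> omega

theorem minRank_char (nodes : List (List (String × String))) :
    pvMinRank nodes 3 =
      if nodes.any (fun n => PySem.Str.isIn "database" (pvType n)) then 0
      else if nodes.any (fun n => PySem.Str.isIn "http" (pvType n)) then 1
      else if nodes.any (fun n => PySem.Str.isIn "slack" (pvType n) || PySem.Str.isIn "email" (pvType n)) then 2
      else 3 := by
  rw [pvMinRank_eq_min nodes 3 (by omega), pvFoldr_char]
  split_ifs <;> omega

theorem extract_purpose_py_eq (name : String) (description : String) (nodes : List (List (String × String))) :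
    extract_purpose_py name description nodes = extract_purpose_py_alt name description nodes := by
  unfold extract_purpose_py extract_purpose_py_alt
  by_cases hd : description = ""
  · by_cases hn : name = ""
    · simp only [hd, hn, ne_eq, not_true_eq_false, if_false]
      rw [minRank_char]
      simp only [List.any_map, Function.comp_def, pvType]
      split_ifs <;> simp [pvResults]
    · simp [hd, hn]
  · simp [hd]

-- ===== VERDICT (by name: the statement is the Claim_ definition above) =====
theorem extract_purpose_py_spec : Claim_equal_extract_purpose_py := by
  intro name description nodes _
  unfold Spec_extract_purpose_py
  exact extract_purpose_py_eq name description nodes
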